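-- pv_equiv track=rewrite | github.com/stenlik26/Coding-problems | 520. Detect Capital/solution.py | func
-- ===== SOURCE A (Python) =====
-- def func(word: str):
--
--     lowercase = 0
--     uppercase = 0
--
--     for c in word:
--         if ord(c) < 97:
--             uppercase += 1
--         else:
--             lowercase += 1
--
--     if uppercase == 1 and lowercase != 0:
--         if ord(word[0]) < 97:
--             return True
--         else:
--             return False
--     else:
--         return(uppercase == 1 or uppercase == 0 or lowercase == 0)
-- ===== SOURCE B (Python) =====
-- def func(word: str):
--     all_upper = all(ord(c) < 97 for c in word)
--     all_lower = all(ord(c) >= 97 for c in word)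
--     capitalized = bool(word) and ord(word[0]) < 97 and all(ord(c) >= 97 for c in word[1:])
--     return all_upper or all_lower or capitalized
-- ===== Notes on version B (the rewrite author's own statement) =====
-- stated objective: idiomatic
-- what changed: Replaces A's counting loop plus arithmetic case analysis on the counts with three direct predicate checks (all-upper, all-lower, capitalized) OR-ed together, keeping the exact ord(c)<97 classifier.
import Mathlib
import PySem

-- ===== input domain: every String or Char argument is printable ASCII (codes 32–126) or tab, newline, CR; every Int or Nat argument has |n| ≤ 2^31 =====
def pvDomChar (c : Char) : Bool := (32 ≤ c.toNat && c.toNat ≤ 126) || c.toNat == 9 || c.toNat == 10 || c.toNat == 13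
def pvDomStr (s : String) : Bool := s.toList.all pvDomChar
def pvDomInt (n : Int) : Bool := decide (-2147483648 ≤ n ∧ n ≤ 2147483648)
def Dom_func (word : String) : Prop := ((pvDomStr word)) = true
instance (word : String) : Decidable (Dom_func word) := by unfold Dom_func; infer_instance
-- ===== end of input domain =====

-- B replaces A's counting loop + arithmetic case analysis with three direct predicate
-- checks (all-upper, all-lower, capitalized) OR-ed together (idiomatic; same O(n) cost).

-- ===== PORT A =====
-- count lowercase/uppercase (by the ord(c) < 97 test), then case-analyse the counts;
-- word[0] is only reached when uppercase == 1 and lowercase != 0, so the string is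
-- nonempty there and the `none` arm of pyGet? is unreachable.
def func (word : String) : Bool :=
  let counts := word.toList.foldl
    (fun (s : Int × Int) c => if (c.toNat : Int) < 97 then (s.1, s.2 + 1) else (s.1 + 1, s.2))
    (0, 0)
  let lowercase := counts.1
  let uppercase := counts.2
  if uppercase = 1 ∧ lowercase ≠ 0 then
    match PySem.List.pyGet? word.toList 0 with
    | some c => decide ((c.toNat : Int) < 97)
    | none => false
  else
    uppercase = 1 ∨ uppercase = 0 ∨ lowercase = 0

-- ===== PORT B =====
def func_alt (word : String) : Bool :=
  let l := word.toList
  let allUpper := l.all fun c => decide ((c.toNat : Int) < 97)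
  let allLower := l.all fun c => decide (97 ≤ (c.toNat : Int))
  let capitalized := !l.isEmpty &&
      (match PySem.List.pyGet? l 0 with
       | some c => decide ((c.toNat : Int) < 97)
       | none => false) &&
      ((PySem.List.slice l (some 1) none).all fun c => decide (97 ≤ (c.toNat : Int)))
  allUpper || allLower || capitalized

-- ===== PRECONDITION & SPEC =====
def Spec_func (word : String) (out : Bool) : Prop := out = func_alt word
instance (word : String) (out : Bool) : Decidable (Spec_func word out) := by unfold Spec_func; infer_instance

-- ===== CLAIM (what is proved, stated in full; the proofs are below) =====
def Claim_equal_func : Prop := ∀ (word : String), Dom_func word → Spec_func word (func word)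

-- ===== LEMMAS AND PROOFS =====

lemma foldl_counts (l : List Char) (a b : Int) :
    l.foldl (fun (s : Int × Int) c => if (c.toNat : Int) < 97 then (s.1, s.2 + 1) else (s.1 + 1, s.2)) (a, b)
      = (a + (l.countP fun c => decide (97 ≤ (c.toNat : Int))),
         b + (l.countP fun c => decide ((c.toNat : Int) < 97))) := by
  induction l generalizing a b with
  | nil => simp
  | cons c t ih =>
    simp only [List.foldl_cons]
    by_cases hc : (c.toNat : Int) < 97
    · have h2 : decide (97 ≤ (c.toNat : Int)) = false := by simp; omega
      rw [if_pos hc, ih]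
      simp only [List.countP_cons, h2, decide_eq_true hc]
      simp only [Prod.mk.injEq]
      constructor <;> push_cast <;> omega
    · have h1 : decide ((c.toNat : Int) < 97) = false := by simpa using hc
      have h2 : decide (97 ≤ (c.toNat : Int)) = true := by simp; omega
      rw [if_neg hc, ih]
      simp only [List.countP_cons, h1, h2]
      simp only [Prod.mk.injEq]
      constructor <;> push_cast <;> omega

lemma allq_eq (t : List Char) :
    (t.all fun c => decide (97 ≤ (c.toNat : Int)))
      = ((t.countP fun c => decide ((c.toNat : Int) < 97)) == 0) := by
  rw [Bool.eq_iff_iff]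
  simp [List.all_eq_true, List.countP_eq_zero]

lemma allp_eq (t : List Char) :
    (t.all fun c => decide ((c.toNat : Int) < 97))
      = ((t.countP fun c => decide (97 ≤ (c.toNat : Int))) == 0) := by
  rw [Bool.eq_iff_iff]
  simp [List.all_eq_true, List.countP_eq_zero]

-- ===== VERDICT (by name: the statement is the Claim_ definition above) =====
theorem func_spec : Claim_equal_func := by
  unfold Claim_equal_func Spec_func
  intro word _
  unfold func func_alt
  rw [foldl_counts]
  generalize word.toList = l
  cases l with
  | nil => simp
  | cons c t =>
    simp only [List.countP_cons, PySem.List.pyGet?_zero_cons, PySem.List.slice_from_one,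
      List.tail_cons, List.isEmpty_cons, List.all_cons, allq_eq, allp_eq]
    by_cases hc : (c.toNat : Int) < 97
    · have h1 : decide ((c.toNat : Int) < 97) = true := by simpa using hc
      have h2 : decide (97 ≤ (c.toNat : Int)) = false := by simp; omega
      simp only [h1, h2]
      rw [Bool.eq_iff_iff]
      simp only [Bool.or_eq_true, Bool.and_eq_true, beq_iff_eq, decide_eq_true_iff,
        Bool.not_false, Bool.true_and, Bool.false_and, Bool.and_true, if_pos, if_neg]
      split_ifs <;> simp_all [-List.countP_eq_zero] <;> omega
    · have h1 : decide ((c.toNat : Int) < 97) = false := by simpa using hc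
      have h2 : decide (97 ≤ (c.toNat : Int)) = true := by simp; omega
      simp only [h1, h2]
      rw [Bool.eq_iff_iff]
      simp only [Bool.or_eq_true, Bool.and_eq_true, beq_iff_eq, decide_eq_true_iff,
        Bool.not_false, Bool.true_and, Bool.false_and, Bool.and_true]
      split_ifs <;> simp_all [-List.countP_eq_zero] <;> omega
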